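-- pv_equiv track=rewrite | github.com/zongwave/pixelcraft | tools/analyze_paddle_memory.py | calculate_memory_metrics
-- ===== SOURCE A (Python) =====
-- def calculate_memory_metrics(memory_events):
--     if not memory_events:
--         return [], [], [], []
--
--     timestamps = []
--     memory_in_use = []
--     alloc_cumulative = []
--     free_cumulative = []
--     current_usage = 0
--     total_alloc = 0
--     total_free = 0
--
--     for event in memory_events:
--         timestamp, event_type, size, ptr = event
--         timestamps.append(timestamp)
--
--         if event_type == 'alloc':
--             current_usage += size
--             total_alloc += size
--         elif event_type == 'free':
--             current_usage -= size
--             total_free += size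
--
--         memory_in_use.append(max(current_usage, 0))
--         alloc_cumulative.append(total_alloc)
--         free_cumulative.append(total_free)
--
--     return timestamps, memory_in_use, alloc_cumulative, free_cumulative
-- ===== SOURCE B (Python) =====
-- def _prefix(xs):
--     out = []
--     s = 0
--     for x in xs:
--         s += x
--         out.append(s)
--     return out
--
--
-- def calculate_memory_metrics(memory_events):
--     if not memory_events:
--         return [], [], [], []
--     timestamps = [t for (t, _ty, _s, _p) in memory_events]
--     alloc_deltas = [s if ty == 'alloc' else 0 for (_t, ty, s, _p) in memory_events]
--     free_deltas = [s if ty == 'free' else 0 for (_t, ty, s, _p) in memory_events]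
--     running = _prefix([a - f for a, f in zip(alloc_deltas, free_deltas)])
--     return (timestamps,
--             [max(u, 0) for u in running],
--             _prefix(alloc_deltas),
--             _prefix(free_deltas))
-- ===== Notes on version B (the rewrite author's own statement) =====
-- stated objective: alternative
-- what changed: Replaces A's single stateful loop maintaining seven accumulators with a pipeline decomposition: extract timestamp/alloc-delta/free-delta lists per event, compute each cumulative series by an independent prefix-sum pass, and clamp the running usage in a final map.
import Mathlib
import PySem

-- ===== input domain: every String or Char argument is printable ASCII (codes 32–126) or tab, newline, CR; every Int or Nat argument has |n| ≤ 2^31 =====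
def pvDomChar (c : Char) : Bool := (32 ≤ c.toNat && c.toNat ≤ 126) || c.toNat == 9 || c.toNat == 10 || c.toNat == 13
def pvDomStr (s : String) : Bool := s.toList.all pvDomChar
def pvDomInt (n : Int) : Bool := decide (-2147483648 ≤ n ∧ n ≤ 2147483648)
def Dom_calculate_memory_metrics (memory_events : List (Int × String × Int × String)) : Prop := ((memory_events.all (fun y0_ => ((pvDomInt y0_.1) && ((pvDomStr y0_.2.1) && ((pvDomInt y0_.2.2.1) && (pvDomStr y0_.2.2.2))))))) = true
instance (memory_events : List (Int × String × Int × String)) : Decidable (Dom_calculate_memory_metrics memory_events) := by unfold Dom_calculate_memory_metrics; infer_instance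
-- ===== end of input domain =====

-- B replaces A's single stateful loop with a pipeline of per-event delta lists and prefix-sum passes (alternative decomposition; return value only).
-- ===== PORT A =====
def pvAloop (events : List (Int × String × Int × String))
    (ts miu ac fc : List Int) (cur ta tf : Int) : List Int × List Int × List Int × List Int :=
  match events with
  | [] => (ts, miu, ac, fc)
  | (timestamp, event_type, size, _ptr) :: rest =>
    let ts := ts ++ [timestamp]
    if event_type == "alloc" then
      pvAloop rest ts (miu ++ [max (cur + size) 0]) (ac ++ [ta + size]) (fc ++ [tf]) (cur + size) (ta + size) tf
    else if event_type == "free" then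
      pvAloop rest ts (miu ++ [max (cur - size) 0]) (ac ++ [ta]) (fc ++ [tf + size]) (cur - size) ta (tf + size)
    else
      pvAloop rest ts (miu ++ [max cur 0]) (ac ++ [ta]) (fc ++ [tf]) cur ta tf

def calculate_memory_metrics (memory_events : List (Int × String × Int × String)) : List Int × List Int × List Int × List Int :=
  if memory_events = [] then ([], [], [], [])
  else pvAloop memory_events [] [] [] [] 0 0 0

-- ===== PORT B =====
-- _prefix in Source B: running prefix sums, accumulator style
def pvPrefixAux (s : Int) (out : List Int) : List Int → List Int
  | [] => out
  | x :: rest => pvPrefixAux (s + x) (out ++ [s + x]) rest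

def pvPrefix (xs : List Int) : List Int := pvPrefixAux 0 [] xs

def calculate_memory_metrics_alt (memory_events : List (Int × String × Int × String)) : List Int × List Int × List Int × List Int :=
  if memory_events = [] then ([], [], [], [])
  else
    let timestamps := memory_events.map (fun e => e.1)
    let alloc_deltas := memory_events.map (fun e => if e.2.1 == "alloc" then e.2.2.1 else 0)
    let free_deltas := memory_events.map (fun e => if e.2.1 == "free" then e.2.2.1 else 0)
    let running := pvPrefix (List.zipWith (fun a f => a - f) alloc_deltas free_deltas)
    (timestamps, running.map (fun u => max u 0), pvPrefix alloc_deltas, pvPrefix free_deltas)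

-- ===== PRECONDITION & SPEC =====
def Spec_calculate_memory_metrics (memory_events : List (Int × String × Int × String)) (out : List Int × List Int × List Int × List Int) : Prop := out = calculate_memory_metrics_alt memory_events
instance (memory_events : List (Int × String × Int × String)) (out : List Int × List Int × List Int × List Int) : Decidable (Spec_calculate_memory_metrics memory_events out) := by unfold Spec_calculate_memory_metrics; infer_instance

-- ===== CLAIM (what is proved, stated in full; the proofs are below) =====
def Claim_equal_calculate_memory_metrics : Prop := ∀ (memory_events : List (Int × String × Int × String)), Dom_calculate_memory_metrics memory_events → Spec_calculate_memory_metrics memory_events (calculate_memory_metrics memory_events)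

-- ===== LEMMAS AND PROOFS =====

theorem pvPrefixAux_append (xs : List Int) (s : Int) (out : List Int) :
    pvPrefixAux s out xs = out ++ pvPrefixAux s [] xs := by
  induction xs generalizing s out with
  | nil => simp [pvPrefixAux]
  | cons x rest ih =>
    rw [pvPrefixAux, pvPrefixAux, ih (s + x) (out ++ [s + x]), ih (s + x) ([] ++ [s + x])]
    simp

theorem pvPrefixAux_cons (s x : Int) (xs : List Int) :
    pvPrefixAux s [] (x :: xs) = (s + x) :: pvPrefixAux (s + x) [] xs := by
  rw [pvPrefixAux, pvPrefixAux_append]; simp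

theorem pvZipMap (l : List (Int × String × Int × String)) :
    List.zipWith (fun a f => a - f)
        (l.map (fun e => if e.2.1 == "alloc" then e.2.2.1 else 0))
        (l.map (fun e => if e.2.1 == "free" then e.2.2.1 else 0))
      = l.map (fun e => (if e.2.1 == "alloc" then e.2.2.1 else 0)
                        - (if e.2.1 == "free" then e.2.2.1 else 0)) := by
  induction l with
  | nil => rfl
  | cons e rest _ => simp

theorem pvAloop_eq (events : List (Int × String × Int × String))
    (ts miu ac fc : List Int) (cur ta tf : Int) :
    pvAloop events ts miu ac fc cur ta tf =
      (ts ++ events.map (fun e => e.1),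
       miu ++ (pvPrefixAux cur [] (events.map (fun e =>
                 (if e.2.1 == "alloc" then e.2.2.1 else 0)
                 - (if e.2.1 == "free" then e.2.2.1 else 0)))).map (fun u => max u 0),
       ac ++ pvPrefixAux ta [] (events.map (fun e => if e.2.1 == "alloc" then e.2.2.1 else 0)),
       fc ++ pvPrefixAux tf [] (events.map (fun e => if e.2.1 == "free" then e.2.2.1 else 0))) := by
  induction events generalizing ts miu ac fc cur ta tf with
  | nil => simp [pvAloop, pvPrefixAux]
  | cons e rest ih =>
    obtain ⟨t, ty, sz, p⟩ := e
    by_cases h1 : ty = "alloc"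
    · subst h1
      rw [pvAloop]
      simp [ih, pvPrefixAux_cons]
    · by_cases h2 : ty = "free"
      · subst h2
        rw [pvAloop]
        simp [ih, pvPrefixAux_cons, sub_eq_add_neg]
      · rw [pvAloop]
        simp [ih, pvPrefixAux_cons, h1, h2]

-- ===== VERDICT (by name: the statement is the Claim_ definition above) =====
theorem calculate_memory_metrics_spec : Claim_equal_calculate_memory_metrics := by
  intro memory_events _
  unfold Spec_calculate_memory_metrics
  by_cases h : memory_events = []
  · simp [h, calculate_memory_metrics, calculate_memory_metrics_alt]
  · simp only [calculate_memory_metrics, calculate_memory_metrics_alt, h, if_false]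
    rw [pvAloop_eq, pvPrefix, pvPrefix, pvPrefix, pvZipMap]
    simp
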